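-- pv_equiv track=rewrite | github.com/alirz-pixel/auto_complelete | test/etc/skipCompressedTrie.py | _common_prefix_len_with_edge_skip
-- ===== SOURCE A (Python) =====
-- from typing import List, Tuple, Set
--
-- def _common_prefix_len_with_edge_skip(prefix: str, edge: str, skip_cnt: int) -> Tuple[int, int]:
--     """
--     edge를 skip_cnt만큼 건너뛰면서 prefix와 최대한 매칭
--     반환: (prefix와 매칭된 edge 길이, 사용한 skip 수)
--     """
--     results = []
--     for skip_used in range(skip_cnt + 1):
--         match_len = 0
--         i, j = 0, skip_used
--         while i < len(prefix) and j < len(edge) and prefix[i] == edge[j]: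
--             i += 1
--             j += 1
--             match_len += 1
--
--         if match_len + skip_used > 0:
--             results.append((match_len + skip_used, skip_used))
--     return results
-- ===== SOURCE B (Python) =====
-- def _common_prefix_len_with_edge_skip(prefix: str, edge: str, skip_cnt: int):
--     # Z-algorithm on prefix + '\x00' + edge: all LCPs of prefix with suffixes of
--     # edge in one linear pass instead of one scan per skip offset.
--     s = prefix + "\x00" + edge
--     n = len(s)
--     z = [0] * n
--     l = r = 0
--     for i in range(1, n):
--         k = min(r - i, z[i - l]) if i < r else 0
--         while i + k < n and s[k] == s[i + k]:
--             k += 1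
--         z[i] = k
--         if i + k > r:
--             l, r = i, i + k
--     base = len(prefix) + 1
--     results = []
--     for skip in range(skip_cnt + 1):
--         ml = z[base + skip] if base + skip < n else 0
--         if ml + skip > 0:
--             results.append((ml + skip, skip))
--     return results
-- ===== Notes on version B (the rewrite author's own statement) =====
-- stated objective: faster
-- what changed: Instead of rescanning prefix against edge for every skip offset, B runs the Z-algorithm once on prefix+'\x00'+edge and reads each offset's LCP out of the z-array.
import Mathlib
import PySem

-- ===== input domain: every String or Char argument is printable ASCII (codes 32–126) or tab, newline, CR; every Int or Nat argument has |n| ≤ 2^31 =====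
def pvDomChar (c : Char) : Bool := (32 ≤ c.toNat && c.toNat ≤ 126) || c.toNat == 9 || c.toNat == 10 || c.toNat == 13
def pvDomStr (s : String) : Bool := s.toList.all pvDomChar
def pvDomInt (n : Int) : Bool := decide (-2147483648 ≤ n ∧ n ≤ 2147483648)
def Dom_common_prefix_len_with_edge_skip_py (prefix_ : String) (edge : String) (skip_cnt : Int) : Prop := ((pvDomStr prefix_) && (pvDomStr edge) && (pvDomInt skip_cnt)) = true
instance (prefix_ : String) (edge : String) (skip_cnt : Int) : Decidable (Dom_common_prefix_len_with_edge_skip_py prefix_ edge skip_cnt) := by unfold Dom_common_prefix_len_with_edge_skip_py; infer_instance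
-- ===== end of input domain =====

-- B replaces A's per-skip rescans by one Z-algorithm pass over prefix+'\x00'+edge (asymptotically faster).

-- ===== PORT A =====
-- the inner `while i < len(prefix) and j < len(edge) and prefix[i] == edge[j]` loop
def pyWhileA (p e : List Char) (i j ml : Int) : Int :=
  if h : i < (p.length : Int) ∧ j < (e.length : Int) ∧ PySem.List.pyGet? p i = PySem.List.pyGet? e j then
    pyWhileA p e (i + 1) (j + 1) (ml + 1)
  else ml
termination_by ((p.length : Int) - i).toNat
decreasing_by omega

def common_prefix_len_with_edge_skip_py (prefix_ : String) (edge : String) (skip_cnt : Int) : List (Int × Int) :=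
  (PySem.List.pyRange 0 (skip_cnt + 1) 1).foldl
    (fun results skip_used =>
      let match_len := pyWhileA prefix_.toList edge.toList 0 skip_used 0
      if match_len + skip_used > 0 then results ++ [(match_len + skip_used, skip_used)] else results)
    []

-- ===== PORT B =====
-- the inner `while i + k < n and s[k] == s[i + k]` loop of the Z-algorithm
def zExtend (s : List Char) (i k : Nat) : Nat :=
  if h : i + k < s.length ∧ s[k]? = s[i + k]? then zExtend s i (k + 1) else k
termination_by s.length - (i + k)
decreasing_by omega

-- one iteration of the Z-algorithm's main `for i in range(1, n)` loop, state (z, l, r)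
def zStep (s : List Char) (st : List Nat × Nat × Nat) (i : Nat) : List Nat × Nat × Nat :=
  let z := st.1
  let l := st.2.1
  let r := st.2.2
  let k0 := if i < r then min (r - i) (z.getD (i - l) 0) else 0
    let k := zExtend s i k0
    let z' := z.set i k
    if r < i + k then (z', i, i + k) else (z', l, r)

def zArr (s : List Char) : List Nat :=
  ((List.range' 1 (s.length - 1)).foldl (zStep s) (List.replicate s.length 0, 0, 0)).1

def common_prefix_len_with_edge_skip_py_alt (prefix_ : String) (edge : String) (skip_cnt : Int) : List (Int × Int) :=
  let s := prefix_.toList ++ '\x00' :: edge.toList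
  let z := zArr s
  let base : Int := (prefix_.toList.length : Int) + 1
  (PySem.List.pyRange 0 (skip_cnt + 1) 1).foldl
    (fun results skip =>
      let ml : Int := if base + skip < (s.length : Int) then ((z.getD (base + skip).toNat 0 : Nat) : Int) else 0
      if ml + skip > 0 then results ++ [(ml + skip, skip)] else results)
    []

-- ===== PRECONDITION & SPEC =====
def Spec_common_prefix_len_with_edge_skip_py (prefix_ : String) (edge : String) (skip_cnt : Int) (out : List (Int × Int)) : Prop := out = common_prefix_len_with_edge_skip_py_alt prefix_ edge skip_cnt
instance (prefix_ : String) (edge : String) (skip_cnt : Int) (out : List (Int × Int)) : Decidable (Spec_common_prefix_len_with_edge_skip_py prefix_ edge skip_cnt out) := by unfold Spec_common_prefix_len_with_edge_skip_py; infer_instance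

-- ===== CLAIM (what is proved, stated in full; the proofs are below) =====
def Claim_equal_common_prefix_len_with_edge_skip_py : Prop := ∀ (prefix_ : String) (edge : String) (skip_cnt : Int), Dom_common_prefix_len_with_edge_skip_py prefix_ edge skip_cnt → Spec_common_prefix_len_with_edge_skip_py prefix_ edge skip_cnt (common_prefix_len_with_edge_skip_py prefix_ edge skip_cnt)

-- ===== LEMMAS AND PROOFS =====

-- length of the longest common prefix of two character lists
def lcp : List Char → List Char → Nat
  | a :: as, b :: bs => if a = b then lcp as bs + 1 else 0
  | _, _ => 0

lemma lcp_nil_left (b : List Char) : lcp [] b = 0 := by cases b <;> rfl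
lemma lcp_nil_right (a : List Char) : lcp a [] = 0 := by cases a <;> rfl

lemma lcp_le_left (a b : List Char) : lcp a b ≤ a.length := by
  induction a generalizing b with
  | nil => simp [lcp_nil_left]
  | cons x xs ih =>
    cases b with
    | nil => simp [lcp_nil_right]
    | cons y ys =>
      simp only [lcp]
      split
      · have := ih ys; simp; omega
      · simp

lemma lcp_le_right (a b : List Char) : lcp a b ≤ b.length := by
  induction a generalizing b with
  | nil => simp [lcp_nil_left]
  | cons x xs ih =>
    cases b with
    | nil => simp [lcp_nil_right]
    | cons y ys =>
      simp only [lcp]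
      split
      · have := ih ys; simp; omega
      · simp

lemma getElem?_eq_of_lt_lcp {a b : List Char} {k : Nat} (h : k < lcp a b) : a[k]? = b[k]? := by
  induction a generalizing b k with
  | nil => simp [lcp_nil_left] at h
  | cons x xs ih =>
    cases b with
    | nil => simp [lcp_nil_right] at h
    | cons y ys =>
      simp only [lcp] at h
      split at h
      · cases k with
        | zero => simp [*]
        | succ k => simpa using ih (by omega)
      · omega

lemma lcp_max {a b : List Char} (ha : lcp a b < a.length) (hb : lcp a b < b.length) :
    a[lcp a b]? ≠ b[lcp a b]? := by
  induction a generalizing b with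
  | nil => simp at ha
  | cons x xs ih =>
    cases b with
    | nil => simp at hb
    | cons y ys =>
      by_cases hxy : x = y
      · simp only [lcp, if_pos hxy] at ha hb ⊢
        simp only [List.length_cons] at ha hb
        simpa [List.getElem?_cons_succ] using ih (by omega) (by omega)
      · simp [lcp, hxy]

lemma le_lcp_of {a b : List Char} {m : Nat} (hm : ∀ k, k < m → a[k]? = b[k]?)
    (hla : m ≤ a.length) (hlb : m ≤ b.length) : m ≤ lcp a b := by
  induction a generalizing b m with
  | nil => simp at hla; omega
  | cons x xs ih =>
    cases m with
    | zero => omega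
    | succ m =>
      cases b with
      | nil => simp at hlb
      | cons y ys =>
        have h0 := hm 0 (by omega)
        simp at h0
        simp only [lcp, if_pos h0]
        have : m ≤ lcp xs ys := by
          apply ih (fun k hk => ?_) (by simpa using hla) (by simpa using hlb)
          have := hm (k + 1) (by omega)
          simpa using this
        omega

-- A's while loop computes (ml + lcp of the remaining suffixes)
lemma pyWhileA_eq (p e : List Char) : ∀ (n i j : Nat) (ml : Int), p.length - i ≤ n →
    pyWhileA p e i j ml = ml + (lcp (p.drop i) (e.drop j) : Int) := by
  intro n
  induction n with
  | zero =>
    intro i j ml hn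
    rw [pyWhileA]
    rw [dif_neg]
    · rw [List.drop_eq_nil_of_le (by omega), lcp_nil_left]; simp
    · push Not; intro h; exfalso; exact absurd h (by exact_mod_cast by omega)
  | succ n ih =>
    intro i j ml hn
    rw [pyWhileA]
    by_cases h : (i : Int) < (p.length : Int) ∧ (j : Int) < (e.length : Int) ∧
        PySem.List.pyGet? p i = PySem.List.pyGet? e j
    · obtain ⟨h1, h2, h3⟩ := h
      have hi : i < p.length := by exact_mod_cast h1
      have hj : j < e.length := by exact_mod_cast h2
      have hchar : p[i] = e[j] := by
        simp [PySem.List.pyGet?_natCast, List.getElem?_eq_getElem hi, List.getElem?_eq_getElem hj] at h3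
        exact h3
      rw [dif_pos ⟨h1, h2, h3⟩]
      have : ((i : Int) + 1) = ((i + 1 : Nat) : Int) := by push_cast; ring
      rw [this]
      have : ((j : Int) + 1) = ((j + 1 : Nat) : Int) := by push_cast; ring
      rw [this]
      rw [ih (i + 1) (j + 1) (ml + 1) (by omega)]
      rw [List.drop_eq_getElem_cons hi, List.drop_eq_getElem_cons hj]
      simp only [lcp, if_pos hchar]
      push_cast; ring
    · rw [dif_neg h]
      push Not at h
      rcases Nat.lt_or_ge i p.length with hi | hi
      · rcases Nat.lt_or_ge j e.length with hj | hj
        · have h3 := h (by exact_mod_cast hi) (by exact_mod_cast hj)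
          have hchar : p[i] ≠ e[j] := by
            intro hc
            apply h3
            simp [PySem.List.pyGet?_natCast, List.getElem?_eq_getElem hi,
              List.getElem?_eq_getElem hj, hc]
          rw [List.drop_eq_getElem_cons hi, List.drop_eq_getElem_cons hj]
          simp [lcp, hchar]
        · rw [List.drop_eq_nil_of_le hj, lcp_nil_right]; simp
      · rw [List.drop_eq_nil_of_le hi, lcp_nil_left]; simp

-- the Z-extension loop reaches exactly the lcp when started at a sound lower bound
lemma zExtend_eq_lcp (s : List Char) (i : Nat) : ∀ (n k : Nat),
    lcp s (s.drop i) - k ≤ n → k ≤ lcp s (s.drop i) → zExtend s i k = lcp s (s.drop i) := by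
  intro n
  induction n with
  | zero =>
    intro k hn hk
    have hkL : k = lcp s (s.drop i) := by omega
    subst hkL
    rw [zExtend, dif_neg]
    rintro ⟨h1, h2⟩
    have hd : (s.drop i)[lcp s (s.drop i)]? = s[i + lcp s (s.drop i)]? := by
      simp [List.getElem?_drop]
    have hlen : lcp s (s.drop i) < s.length := by omega
    have hlen2 : lcp s (s.drop i) < (s.drop i).length := by simp; omega
    exact lcp_max hlen hlen2 (h2.trans hd.symm)
  | succ n ih =>
    intro k hn hk
    rcases Nat.lt_or_ge k (lcp s (s.drop i)) with hlt | hge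
    · have hlen2 : lcp s (s.drop i) ≤ (s.drop i).length := lcp_le_right _ _
      have hik : i + k < s.length := by simp at hlen2; omega
      have hc : s[k]? = s[i + k]? := by
        have := getElem?_eq_of_lt_lcp hlt
        simpa [List.getElem?_drop] using this
      rw [zExtend, dif_pos ⟨hik, hc⟩]
      exact ih (k + 1) (by omega) (by omega)
    · have hkL : k = lcp s (s.drop i) := by omega
      subst hkL
      rw [zExtend, dif_neg]
      rintro ⟨h1, h2⟩
      have hd : (s.drop i)[lcp s (s.drop i)]? = s[i + lcp s (s.drop i)]? := by
        simp [List.getElem?_drop]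
      have hlen : lcp s (s.drop i) < s.length := by omega
      have hlen2 : lcp s (s.drop i) < (s.drop i).length := by simp; omega
      exact lcp_max hlen hlen2 (h2.trans hd.symm)

-- invariant of the Z-algorithm main loop after processing i = 1 .. t
def ZInv (s : List Char) (t : Nat) (st : List Nat × Nat × Nat) : Prop :=
  st.1.length = s.length ∧
  (∀ j, 1 ≤ j → j < 1 + t → st.1.getD j 0 = lcp s (s.drop j)) ∧
  ((st.2.1 = 0 ∧ st.2.2 = 0) ∨
   (1 ≤ st.2.1 ∧ st.2.1 < 1 + t ∧ st.2.2 = st.2.1 + lcp s (s.drop st.2.1)))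

lemma zInv_hold (s : List Char) : ∀ t, 1 + t ≤ s.length →
    ZInv s t ((List.range' 1 t).foldl (zStep s) (List.replicate s.length 0, 0, 0)) := by
  intro t
  induction t with
  | zero =>
    intro _
    refine ⟨by simp, fun j hj1 hj2 => by omega, Or.inl ⟨rfl, rfl⟩⟩
  | succ t ih =>
    intro ht
    have ih' := ih (by omega)
    rw [List.range'_concat, List.foldl_append]
    simp only [List.foldl_cons, List.foldl_nil, one_mul]
    rcases hfold : (List.range' 1 t).foldl (zStep s) (List.replicate s.length 0, 0, 0)
      with ⟨z, l, r⟩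
    rw [hfold] at ih'
    obtain ⟨hlen, hent, hlr⟩ := ih'
    simp only at hlen hent hlr
    set i := 1 + t with hi
    have hi1 : 1 ≤ i := by omega
    have hi2 : i < s.length := by omega
    -- the starting value k0 is a sound lower bound for lcp s (s.drop i)
    have hk0 : (if i < r then min (r - i) (z.getD (i - l) 0) else 0) ≤ lcp s (s.drop i) := by
      split
      · rename_i hir
        rcases hlr with ⟨hl0, hr0⟩ | ⟨hl1, hl2, hr⟩
        · omega
        · have hq : z.getD (i - l) 0 = lcp s (s.drop (i - l)) :=
            hent (i - l) (by omega) (by omega)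
          have hrlen : r ≤ s.length := by
            have := lcp_le_right s (s.drop l)
            simp at this
            omega
          apply le_lcp_of
          · intro k hk
            rw [hq] at hk
            have hk1 : k < lcp s (s.drop (i - l)) := by omega
            have hk2 : k < r - i := by omega
            have e1 : s[k]? = s[(i - l) + k]? := by
              have := getElem?_eq_of_lt_lcp hk1
              simpa [List.getElem?_drop] using this
            have e2 : s[(i - l) + k]? = s[i + k]? := by
              have hm : (i - l) + k < lcp s (s.drop l) := by omega
              have h' := getElem?_eq_of_lt_lcp hm
              simp only [List.getElem?_drop] at h'
              have hidx : l + ((i - l) + k) = i + k := by omega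
              rw [h', hidx]
            have e3 : (s.drop i)[k]? = s[i + k]? := by simp [List.getElem?_drop]
            rw [e3, ← e2, ← e1]
          · have := lcp_le_left s (s.drop (i - l))
            rw [hq]; omega
          · simp only [List.length_drop]
            rw [hq]; omega
      · omega
    have hk : zExtend s i (if i < r then min (r - i) (z.getD (i - l) 0) else 0)
        = lcp s (s.drop i) :=
      zExtend_eq_lcp s i _ _ (le_refl _) hk0
    simp only [zStep]
    rw [hk]
    have hset_len : (z.set i (lcp s (s.drop i))).length = s.length := by simp [hlen]
    have hset_ent : ∀ j, 1 ≤ j → j < 1 + (t + 1) →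
        (z.set i (lcp s (s.drop i))).getD j 0 = lcp s (s.drop j) := by
      intro j hj1 hj2
      rcases eq_or_ne j i with rfl | hne
      · rw [List.getD_eq_getElem?_getD, List.getElem?_set_self (by omega)]
        simp
      · rw [List.getD_eq_getElem?_getD, List.getElem?_set_ne (by omega)]
        rw [← List.getD_eq_getElem?_getD]
        exact hent j hj1 (by omega)
    split
    · exact ⟨hset_len, hset_ent, Or.inr ⟨hi1, show i < 1 + (t + 1) by omega, rfl⟩⟩
    · refine ⟨hset_len, hset_ent, ?_⟩
      rcases hlr with ⟨hl0, hr0⟩ | ⟨hl1, hl2, hr⟩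
      · exact Or.inl ⟨hl0, hr0⟩
      · exact Or.inr ⟨hl1, show l < 1 + (t + 1) by omega, hr⟩

lemma zArr_getD (s : List Char) (i : Nat) (h1 : 1 ≤ i) (h2 : i < s.length) :
    (zArr s).getD i 0 = lcp s (s.drop i) := by
  obtain ⟨hlen, hent, _⟩ := zInv_hold s (s.length - 1) (by omega)
  exact hent i h1 (by omega)

-- a separator absent from v cuts the lcp at the end of p
lemma lcp_append_sep (p u v : List Char) (c : Char) (hc : c ∉ v) :
    lcp (p ++ c :: u) v = lcp p v := by
  induction p generalizing v with
  | nil =>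
    cases v with
    | nil => simp [lcp_nil_right]
    | cons b bs =>
      have : c ≠ b := fun h => hc (h ▸ List.mem_cons_self)
      simp [lcp, this]
  | cons a as ih =>
    cases v with
    | nil => simp [lcp_nil_right]
    | cons b bs =>
      simp only [List.cons_append, lcp]
      split
      · rw [ih bs (fun h => hc (List.mem_cons_of_mem _ h))]
      · rfl

lemma sep_not_mem {t : String} (h : pvDomStr t = true) : '\x00' ∉ t.toList := by
  intro hmem
  have := List.all_eq_true.mp h _ hmem
  simp [pvDomChar] at this

-- ===== VERDICT (by name: the statement is the Claim_ definition above) =====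
theorem common_prefix_len_with_edge_skip_py_spec : Claim_equal_common_prefix_len_with_edge_skip_py := by
  intro prefix_ edge skip_cnt hdom
  unfold Spec_common_prefix_len_with_edge_skip_py
  unfold common_prefix_len_with_edge_skip_py common_prefix_len_with_edge_skip_py_alt
  have hdome : pvDomStr edge = true := by
    unfold Dom_common_prefix_len_with_edge_skip_py at hdom
    simp at hdom
    exact hdom.1.2
  set p := prefix_.toList with hp
  set e := edge.toList with he
  set s := p ++ '\x00' :: e with hs
  apply PySem.List.foldl_congr_mem
  intro acc x hx
  have hx0 : 0 ≤ x := (PySem.List.mem_pyRange_one.mp hx).1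
  have hA : pyWhileA p e 0 x 0 = (lcp p (e.drop x.toNat) : Int) := by
    have h' := pyWhileA_eq p e p.length 0 x.toNat 0 (by omega)
    simp only [Nat.cast_zero, List.drop_zero, zero_add] at h'
    rwa [Int.toNat_of_nonneg hx0] at h'
  have hB : (if ((p.length : Int) + 1) + x < (s.length : Int) then
        (((zArr s).getD (((p.length : Int) + 1) + x).toNat 0 : Nat) : Int) else 0)
      = (lcp p (e.drop x.toNat) : Int) := by
    have hslen : s.length = p.length + 1 + e.length := by simp [hs]; omega
    split
    · rename_i hin
      have hidx : (((p.length : Int) + 1) + x).toNat = p.length + 1 + x.toNat := by omega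
      have hxe : x.toNat < e.length := by omega
      rw [hidx, zArr_getD s _ (by omega) (by omega)]
      have hdrop : s.drop (p.length + 1 + x.toNat) = e.drop x.toNat := by
        rw [hs, List.drop_append, List.drop_eq_nil_of_le (by omega)]
        rw [show p.length + 1 + x.toNat - p.length = x.toNat + 1 by omega]
        rw [List.drop_succ_cons]
        simp
      rw [hdrop]
      have hsep := lcp_append_sep p e (e.drop x.toNat) '\x00'
        (fun h => sep_not_mem hdome (List.drop_subset _ _ h))
      rw [hs, hsep]
    · rename_i hout
      have hxe : e.length ≤ x.toNat := by omega
      rw [List.drop_eq_nil_of_le hxe, lcp_nil_right]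
      simp
  simp only [hA, hB]
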